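-- pv_equiv track=rewrite | github.com/jmiller9930/blackbox | training/exams/finquant_exam_proctor.py | _find_json_objects
-- ===== SOURCE A (Python) =====
-- def _find_json_objects(text: str) -> list[str]:
--     """Find all top-level JSON objects using bracket counting (handles nesting)."""
--     results = []
--     depth = 0
--     start = -1
--     in_string = False
--     escape = False
--     for i, ch in enumerate(text):
--         if escape:
--             escape = False
--             continue
--         if ch == "\\" and in_string:
--             escape = True
--             continue
--         if ch == '"':
--             in_string = not in_string
--             continue
--         if in_string:
--             continue
--         if ch == "{":
--             if depth == 0:
--                 start = i
--             depth += 1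
--         elif ch == "}":
--             depth -= 1
--             if depth == 0 and start != -1:
--                 results.append(text[start:i + 1])
--                 start = -1
--     return results
-- ===== SOURCE B (Python) =====
-- def _find_json_objects(text: str) -> list[str]:
--     """Two-pass variant: first filter out-of-string braces with their positions,
--     then do the depth counting over that (usually much shorter) list."""
--     braces = []
--     in_string = False
--     escape = False
--     for i, ch in enumerate(text):
--         if escape:
--             escape = False
--         elif ch == "\\" and in_string:
--             escape = True
--         elif ch == '"':
--             in_string = not in_string
--         elif not in_string and ch in "{}":
--             braces.append((i, ch))
--     results = []
--     depth = 0
--     start = -1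
--     for i, ch in braces:
--         if ch == "{":
--             if depth == 0:
--                 start = i
--             depth += 1
--         else:
--             depth -= 1
--             if depth == 0 and start != -1:
--                 results.append(text[start:i + 1])
--                 start = -1
--     return results
-- ===== Notes on version B (the rewrite author's own statement) =====
-- stated objective: alternative
-- what changed: Split A's single five-state loop into two passes: a string-aware scan that collects only the brace characters outside strings with their positions, then a depth-counting fold over that filtered list.
import Mathlib
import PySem

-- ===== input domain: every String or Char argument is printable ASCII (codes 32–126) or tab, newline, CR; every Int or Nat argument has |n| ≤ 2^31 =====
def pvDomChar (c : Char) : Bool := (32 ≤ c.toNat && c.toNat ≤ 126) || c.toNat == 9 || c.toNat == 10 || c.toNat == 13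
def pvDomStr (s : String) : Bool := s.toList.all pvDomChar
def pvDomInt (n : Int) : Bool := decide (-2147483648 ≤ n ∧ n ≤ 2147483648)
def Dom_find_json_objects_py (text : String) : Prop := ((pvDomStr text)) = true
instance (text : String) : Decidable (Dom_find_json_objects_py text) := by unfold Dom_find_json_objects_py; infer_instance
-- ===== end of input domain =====

-- B splits A's single five-state loop into two passes (filter out-of-string braces, then depth-count); same cost, different decomposition.


-- ===== PORT A =====
-- one step of A's loop; state = (results, depth, start, in_string, escape)
def pvStepA (tl : List Char) (st : List String × Int × Int × Bool × Bool) (p : Int × Char)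
    : List String × Int × Int × Bool × Bool :=
  match st with
  | (res, depth, start, inS, esc) =>
    if esc then (res, depth, start, inS, false)
    else if p.2 = '\\' ∧ inS = true then (res, depth, start, inS, true)
    else if p.2 = '"' then (res, depth, start, !inS, esc)
    else if inS then (res, depth, start, inS, esc)
    else if p.2 = '{' then
      (res, depth + 1, (if depth = 0 then p.1 else start), inS, esc)
    else if p.2 = '}' then
      if depth - 1 = 0 ∧ start ≠ -1 then
        (res ++ [String.ofList (PySem.List.slice tl (some start) (some (p.1 + 1)))], depth - 1, -1, inS, esc)
      else (res, depth - 1, start, inS, esc)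
    else (res, depth, start, inS, esc)

def find_json_objects_py (text : String) : List String :=
  ((PySem.List.enumerate text.toList 0).foldl (pvStepA text.toList)
    ([], 0, -1, false, false)).1

-- ===== PORT B =====
-- pass 1: collect out-of-string braces with positions; state = (braces, in_string, escape)
def pvStep1 (st : List (Int × Char) × Bool × Bool) (p : Int × Char)
    : List (Int × Char) × Bool × Bool :=
  match st with
  | (bs, inS, esc) =>
    if esc then (bs, inS, false)
    else if p.2 = '\\' ∧ inS = true then (bs, inS, true)
    else if p.2 = '"' then (bs, !inS, esc)
    else if inS = false ∧ (p.2 = '{' ∨ p.2 = '}') then (bs ++ [p], inS, esc)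
    else (bs, inS, esc)

-- pass 2: depth counting over the brace list; state = (results, depth, start)
def pvStep2 (tl : List Char) (st : List String × Int × Int) (p : Int × Char)
    : List String × Int × Int :=
  match st with
  | (res, depth, start) =>
    if p.2 = '{' then (res, depth + 1, (if depth = 0 then p.1 else start))
    else
      if depth - 1 = 0 ∧ start ≠ -1 then
        (res ++ [String.ofList (PySem.List.slice tl (some start) (some (p.1 + 1)))], depth - 1, -1)
      else (res, depth - 1, start)

def find_json_objects_py_alt (text : String) : List String :=
  let tl := text.toList
  let braces := ((PySem.List.enumerate tl 0).foldl pvStep1 ([], false, false)).1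
  (braces.foldl (pvStep2 tl) ([], 0, -1)).1

-- ===== PRECONDITION & SPEC =====
def Spec_find_json_objects_py (text : String) (out : List String) : Prop := out = find_json_objects_py_alt text
instance (text : String) (out : List String) : Decidable (Spec_find_json_objects_py text out) := by unfold Spec_find_json_objects_py; infer_instance

-- ===== CLAIM (what is proved, stated in full; the proofs are below) =====
def Claim_equal_find_json_objects_py : Prop := ∀ (text : String), Dom_find_json_objects_py text → Spec_find_json_objects_py text (find_json_objects_py text)

-- ===== LEMMAS AND PROOFS =====

-- pass 1's accumulator only grows on the right
theorem pvStep1_acc (l : List (Int × Char)) : ∀ (bs : List (Int × Char)) (inS esc : Bool),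
    l.foldl pvStep1 (bs, inS, esc)
      = ((bs ++ (l.foldl pvStep1 ([], inS, esc)).1),
         (l.foldl pvStep1 ([], inS, esc)).2) := by
  induction l with
  | nil => intro bs inS esc; simp
  | cons p l ih =>
    intro bs inS esc
    simp only [List.foldl_cons, pvStep1, List.nil_append]
    split_ifs with h1 h2 h3 h4
    · exact ih bs inS false
    · exact ih bs inS true
    · exact ih bs (!inS) esc
    · rw [ih (bs ++ [p]), ih [p]]; simp
    · exact ih bs inS esc

-- A's fold equals pass 1 followed by pass 2
theorem pv_key (tl : List Char) (l : List (Int × Char)) :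
    ∀ (res : List String) (depth start : Int) (inS esc : Bool),
    l.foldl (pvStepA tl) (res, depth, start, inS, esc)
      = (((l.foldl pvStep1 ([], inS, esc)).1.foldl (pvStep2 tl) (res, depth, start)).1,
         ((l.foldl pvStep1 ([], inS, esc)).1.foldl (pvStep2 tl) (res, depth, start)).2.1,
         ((l.foldl pvStep1 ([], inS, esc)).1.foldl (pvStep2 tl) (res, depth, start)).2.2,
         (l.foldl pvStep1 ([], inS, esc)).2) := by
  induction l with
  | nil => intro res depth start inS esc; simp
  | cons p l ih =>
    intro res depth start inS esc
    simp only [List.foldl_cons]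
    cases esc with
    | true =>
      simp only [pvStepA, pvStep1, if_pos trivial]
      exact ih res depth start inS false
    | false =>
    cases inS with
    | true =>
      by_cases h2 : p.2 = '\\'
      · simp [pvStepA, pvStep1, h2]
        exact ih res depth start true true
      · by_cases h3 : p.2 = '"'
        · simp [pvStepA, pvStep1, h3]
          exact ih res depth start false false
        · simp [pvStepA, pvStep1, h2, h3]
          exact ih res depth start true false
    | false =>
      by_cases h3 : p.2 = '"'
      · simp [pvStepA, pvStep1, h3]
        exact ih res depth start true false
      · by_cases h5 : p.2 = '{' ∨ p.2 = '}'
        · simp [pvStepA, pvStep1, h3]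
          rw [if_pos h5, pvStep1_acc l [p]]
          simp only [List.singleton_append, List.foldl_cons]
          rcases h5 with h5 | h5
          · rw [if_pos h5, ih res (depth + 1) (if depth = 0 then p.1 else start) false false]
            simp [pvStep2, h5]
          · have hne : p.2 ≠ '{' := by rw [h5]; decide
            rw [if_neg hne, if_pos h5]
            by_cases h6 : depth - 1 = 0 ∧ ¬ start = -1
            · rw [if_pos h6,
                  ih (res ++ [String.ofList (PySem.List.slice tl (some start) (some (p.1 + 1)))])
                     (depth - 1) (-1) false false]
              simp [pvStep2, hne, h6]
            · rw [if_neg h6, ih res (depth - 1) start false false]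
              simp [pvStep2, hne, h6]
        · push Not at h5
          simp [pvStepA, pvStep1, h3, h5.1, h5.2]
          exact ih res depth start false false

theorem find_json_objects_py_spec : Claim_equal_find_json_objects_py := by
  intro text _
  unfold Spec_find_json_objects_py find_json_objects_py find_json_objects_py_alt
  rw [pv_key text.toList (PySem.List.enumerate text.toList 0) [] 0 (-1) false false]
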